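-- pv_equiv track=rewrite | github.com/cocoheart0128/CodingTest | 프로그래머스/0/181883. 수열과 구간 쿼리 1/수열과 구간 쿼리 1.py | solution
-- ===== SOURCE A (Python) =====
-- def solution(arr, queries):
--     for query in queries:
--         a = query[0]
--         b = query[1]
--
--         for i in range(len(arr)):
--             if i>=a and i<=b:
--                 arr[i]+=1
--             else:
--                 arr[i]=arr[i]
--
--     answer=arr
--     return answer
-- ===== SOURCE B (Python) =====
-- # Difference array + prefix sum: O(N+Q) instead of A's O(N*Q).
-- # Returns the same value as A; unlike A it does not mutate arr in place.
-- def solution(arr, queries):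
--     n = len(arr)
--     diff = [0] * (n + 1)
--     for q in queries:
--         lo = max(q[0], 0)
--         hi = min(q[1], n - 1)
--         if lo <= hi:
--             diff[lo] += 1
--             diff[hi + 1] -= 1
--     out = []
--     run = 0
--     for i in range(n):
--         run += diff[i]
--         out.append(arr[i] + run)
--     return out
-- ===== Notes on version B (the rewrite author's own statement) =====
-- stated objective: faster
-- what changed: Replaces the per-query full scan of arr (O(N) per query) with a difference array updated in O(1) per query plus one prefix-sum pass.
import Mathlib
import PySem

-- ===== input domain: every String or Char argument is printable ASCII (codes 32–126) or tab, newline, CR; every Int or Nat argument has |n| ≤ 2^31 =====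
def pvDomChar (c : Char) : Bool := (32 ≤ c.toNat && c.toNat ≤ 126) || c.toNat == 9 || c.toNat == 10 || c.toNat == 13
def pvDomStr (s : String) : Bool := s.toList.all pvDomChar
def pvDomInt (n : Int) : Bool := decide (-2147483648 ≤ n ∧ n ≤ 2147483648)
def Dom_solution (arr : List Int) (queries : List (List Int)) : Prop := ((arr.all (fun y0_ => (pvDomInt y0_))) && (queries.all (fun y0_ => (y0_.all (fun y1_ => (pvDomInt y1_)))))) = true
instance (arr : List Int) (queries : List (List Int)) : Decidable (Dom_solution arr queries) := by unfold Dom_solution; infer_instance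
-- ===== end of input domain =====

-- B replaces A's O(N) scan per query by a difference array (O(N+Q)); return value only —
-- Python A mutates arr in place, B does not.

-- ===== PORT A =====
-- query[0] / query[1] raise IndexError on short queries; Pre_ excludes those, the .getD 0 is never hit inside Pre_.
def solution (arr : List Int) (queries : List (List Int)) : List Int :=
  queries.foldl (fun cur query =>
    let a := (PySem.List.pyGet? query 0).getD 0
    let b := (PySem.List.pyGet? query 1).getD 0
    (List.range cur.length).foldl (fun (acc : List Int) (i : Nat) =>
      if a ≤ (i : Int) ∧ (i : Int) ≤ b then acc.set i (acc.getD i 0 + 1)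
      else acc.set i (acc.getD i 0)) cur) arr

-- ===== PORT B =====
def solution_alt (arr : List Int) (queries : List (List Int)) : List Int :=
  let n := arr.length
  let diff := queries.foldl (fun d q =>
    let lo := max ((PySem.List.pyGet? q 0).getD 0) 0
    let hi := min ((PySem.List.pyGet? q 1).getD 0) ((n : Int) - 1)
    if lo ≤ hi then
      let d1 := d.set lo.toNat (d.getD lo.toNat 0 + 1)
      d1.set (hi.toNat + 1) (d1.getD (hi.toNat + 1) 0 - 1)
    else d) (List.replicate (n + 1) 0)
  ((List.range n).foldl (fun (st : List Int × Int) i =>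
      let run := st.2 + diff.getD i 0
      (st.1 ++ [arr.getD i 0 + run], run)) ([], 0)).1

-- ===== PRECONDITION & SPEC =====
-- Pre_ excludes exactly the inputs on which Python A raises IndexError: a query with fewer than 2 elements.
def Pre_solution (arr : List Int) (queries : List (List Int)) : Prop :=
  ∀ q ∈ queries, 2 ≤ q.length
instance (arr : List Int) (queries : List (List Int)) : Decidable (Pre_solution arr queries) := by unfold Pre_solution; infer_instance
def pvWitness_solution : List Int × List (List Int) := ([3, 0], [[0, 1]])

def Spec_solution (arr : List Int) (queries : List (List Int)) (out : List Int) : Prop := out = solution_alt arr queries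
instance (arr : List Int) (queries : List (List Int)) (out : List Int) : Decidable (Spec_solution arr queries out) := by unfold Spec_solution; infer_instance

-- ===== CLAIM (what is proved, stated in full; the proofs are below) =====
def Claim_equal_solution : Prop := ∀ (arr : List Int) (queries : List (List Int)), Dom_solution arr queries → Pre_solution arr queries → Spec_solution arr queries (solution arr queries)

-- ===== LEMMAS AND PROOFS =====

-- number of queries [a,b] with a ≤ j ≤ b
def countQ (queries : List (List Int)) (j : Nat) : Int :=
  queries.foldr (fun q acc =>
    (if (PySem.List.pyGet? q 0).getD 0 ≤ (j : Int) ∧ (j : Int) ≤ (PySem.List.pyGet? q 1).getD 0 then 1 else 0) + acc) 0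

-- A's if-then-else branch written as "write f of the old value at i"
def Fab (a b : Int) (i : Nat) (x : Int) : Int := if a ≤ (i : Int) ∧ (i : Int) ≤ b then x + 1 else x

lemma stepA_eq (a b : Int) :
    (fun (acc : List Int) (i : Nat) =>
      if a ≤ (i : Int) ∧ (i : Int) ≤ b then acc.set i (acc.getD i 0 + 1)
      else acc.set i (acc.getD i 0))
    = fun (acc : List Int) (i : Nat) => acc.set i (Fab a b i (acc.getD i 0)) := by
  funext acc i
  unfold Fab
  split <;> rfl

lemma len_foldl_set (f : Nat → Int → Int) (l : List Nat) :
    ∀ cur : List Int,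
      (l.foldl (fun acc i => acc.set i (f i (acc.getD i 0))) cur).length = cur.length := by
  induction l with
  | nil => intro cur; rfl
  | cons x xs ih => intro cur; rw [List.foldl_cons, ih, List.length_set]

lemma getD_foldl_range (f : Nat → Int → Int) :
    ∀ (n : Nat) (cur : List Int), n ≤ cur.length → ∀ j, j < cur.length →
      ((List.range n).foldl (fun acc i => acc.set i (f i (acc.getD i 0))) cur).getD j 0
        = if j < n then f j (cur.getD j 0) else cur.getD j 0 := by
  intro n
  induction n with
  | zero => intro cur _ j hj; simp
  | succ n ih =>
    intro cur hn j hj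
    rw [List.range_succ, List.foldl_append, List.foldl_cons, List.foldl_nil]
    set L := (List.range n).foldl (fun acc i => acc.set i (f i (acc.getD i 0))) cur with hL
    have hlen : L.length = cur.length := len_foldl_set f _ cur
    have hLn : L.getD n 0 = cur.getD n 0 := by
      rw [ih cur (by omega) n (by omega)]; simp
    have hset : ∀ k, k < cur.length →
        (L.set n (f n (L.getD n 0))).getD k 0
          = if k = n then f n (L.getD n 0) else L.getD k 0 := by
      intro k hk
      rw [List.getD_eq_getElem?_getD, List.getElem?_set]
      split
      · next h => subst h; simp [hlen, hk]
      · next h =>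
        rw [← List.getD_eq_getElem?_getD, if_neg (fun hk2 => h hk2.symm)]
    rw [hset j hj]
    by_cases hjn : j = n
    · subst hjn; rw [hLn]; simp
    · rw [if_neg hjn, hL, ih cur (by omega) j hj]
      by_cases hjl : j < n
      · rw [if_pos hjl, if_pos (show j < n + 1 by omega)]
      · rw [if_neg hjl, if_neg (show ¬ j < n + 1 by omega)]

lemma len_solution : ∀ (qs : List (List Int)) (arr : List Int),
    (solution arr qs).length = arr.length := by
  intro qs
  induction qs with
  | nil => intro arr; rfl
  | cons q qs ih =>
    intro arr
    rw [show solution arr (q :: qs) = solution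
        ((List.range arr.length).foldl (fun (acc : List Int) (i : Nat) =>
          if (PySem.List.pyGet? q 0).getD 0 ≤ (i : Int) ∧ (i : Int) ≤ (PySem.List.pyGet? q 1).getD 0
          then acc.set i (acc.getD i 0 + 1) else acc.set i (acc.getD i 0)) arr) qs from rfl]
    rw [ih]
    rw [stepA_eq]
    exact len_foldl_set _ _ arr

lemma getD_solution : ∀ (qs : List (List Int)) (arr : List Int) (j : Nat), j < arr.length →
    (solution arr qs).getD j 0 = arr.getD j 0 + countQ qs j := by
  intro qs
  induction qs with
  | nil => intro arr j hj; simp [solution, countQ]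
  | cons q qs ih =>
    intro arr j hj
    rw [show solution arr (q :: qs) = solution
        ((List.range arr.length).foldl (fun (acc : List Int) (i : Nat) =>
          if (PySem.List.pyGet? q 0).getD 0 ≤ (i : Int) ∧ (i : Int) ≤ (PySem.List.pyGet? q 1).getD 0
          then acc.set i (acc.getD i 0 + 1) else acc.set i (acc.getD i 0)) arr) qs from rfl]
    rw [stepA_eq]
    set a := (PySem.List.pyGet? q 0).getD 0
    set b := (PySem.List.pyGet? q 1).getD 0
    set arr1 := (List.range arr.length).foldl
      (fun acc i => acc.set i (Fab a b i (acc.getD i 0))) arr with harr1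
    have hlen1 : arr1.length = arr.length := len_foldl_set _ _ arr
    rw [ih arr1 j (by omega)]
    rw [harr1, getD_foldl_range _ arr.length arr le_rfl j hj]
    simp only [hj, if_pos]
    unfold Fab countQ
    rw [List.foldr_cons]
    rw [show (List.foldr _ 0 qs : Int) = countQ qs j from rfl]
    split <;> ring

-- ===== B-side lemmas =====

lemma sum_set_sub (l : List Int) (i : Nat) (v : Int) (h : i < l.length) :
    (l.set i v).sum = l.sum + v - l.getD i 0 := by
  have hd : l.sum = (l.take i).sum + (l.getD i 0 + (l.drop (i + 1)).sum) := by
    conv_lhs => rw [← List.take_append_drop i l]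
    rw [List.sum_append, List.drop_eq_getElem_cons h, List.sum_cons,
      List.getD_eq_getElem l 0 h]
  rw [List.sum_set, if_pos h, hd, List.getD_eq_getElem l 0 h]
  ring

lemma sum_take_set (d : List Int) (i m : Nat) (v : Int) (h : i < d.length) :
    ((d.set i v).take m).sum = (d.take m).sum + (if i < m then v - d.getD i 0 else 0) := by
  rw [List.take_set]
  by_cases him : i < m
  · have hl : i < (d.take m).length := by simp [List.length_take]; omega
    rw [sum_set_sub _ _ _ hl, if_pos him]
    have : (d.take m).getD i 0 = d.getD i 0 := by
      rw [List.getD_eq_getElem?_getD, List.getD_eq_getElem?_getD, List.getElem?_take]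
      simp [him]
    rw [this]; ring
  · have : (d.take m).length ≤ i := by simp [List.length_take]; omega
    rw [List.set_eq_of_length_le this, if_neg him]; ring

lemma sum_take_succ (d : List Int) (m : Nat) (h : m < d.length) :
    (d.take (m + 1)).sum = (d.take m).sum + d.getD m 0 := by
  rw [List.take_add_one, List.sum_append, List.getD_eq_getElem d 0 h]
  simp [List.getElem?_eq_getElem h]

-- the indicator a ≤ j ≤ b, as counted by countQ
lemma countQ_cons (q : List Int) (qs : List (List Int)) (j : Nat) :
    countQ (q :: qs) j
      = (if (PySem.List.pyGet? q 0).getD 0 ≤ (j : Int) ∧ (j : Int) ≤ (PySem.List.pyGet? q 1).getD 0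
          then 1 else 0) + countQ qs j := rfl

-- one query updates the prefix sums of the difference array by exactly the indicator
lemma psum_stepB (n : Nat) (d : List Int) (q : List Int) (j : Nat)
    (hd : d.length = n + 1) (hj : j < n) :
    (((fun (d : List Int) (q : List Int) =>
        let lo := max ((PySem.List.pyGet? q 0).getD 0) 0
        let hi := min ((PySem.List.pyGet? q 1).getD 0) ((n : Int) - 1)
        if lo ≤ hi then
          let d1 := d.set lo.toNat (d.getD lo.toNat 0 + 1)
          d1.set (hi.toNat + 1) (d1.getD (hi.toNat + 1) 0 - 1)
        else d) d q).take (j + 1)).sum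
      = (d.take (j + 1)).sum
        + (if (PySem.List.pyGet? q 0).getD 0 ≤ (j : Int) ∧ (j : Int) ≤ (PySem.List.pyGet? q 1).getD 0
            then 1 else 0) := by
  simp only
  set a := (PySem.List.pyGet? q 0).getD 0
  set b := (PySem.List.pyGet? q 1).getD 0
  set lo := max a 0 with hlo
  set hi := min b ((n : Int) - 1) with hhi
  by_cases hcase : lo ≤ hi
  · rw [if_pos hcase]
    have hlo0 : 0 ≤ lo := by omega
    have hhi0 : 0 ≤ hi := le_trans hlo0 hcase
    have hhin : hi ≤ (n : Int) - 1 := by omega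
    have hloL : lo.toNat < d.length := by omega
    have hhiL : hi.toNat + 1 < d.length := by omega
    set d1 := d.set lo.toNat (d.getD lo.toNat 0 + 1) with hd1
    have hd1len : d1.length = d.length := by rw [hd1, List.length_set]
    rw [sum_take_set d1 _ _ _ (by omega)]
    rw [hd1, sum_take_set d _ _ _ hloL]
    have e1 : (if lo.toNat < j + 1 then (d.getD lo.toNat 0 + 1) - d.getD lo.toNat 0 else 0)
        = if lo.toNat < j + 1 then (1 : Int) else 0 := by split <;> ring
    have e2 : (if hi.toNat + 1 < j + 1 then (d1.getD (hi.toNat + 1) 0 - 1) - d1.getD (hi.toNat + 1) 0 else 0)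
        = if hi.toNat + 1 < j + 1 then (-1 : Int) else 0 := by split <;> ring
    rw [e1, e2]
    have l1 : a ≤ lo := le_max_left a 0
    have l3 : lo = a ∨ lo = 0 := max_choice a 0
    have m1 : hi ≤ b := min_le_left _ _
    have m2 : hi ≤ (n : Int) - 1 := min_le_right _ _
    have m3 : hi = b ∨ hi = (n : Int) - 1 := min_choice _ _
    have hiff1 : lo.toNat < j + 1 ↔ a ≤ (j : Int) := by rcases l3 with h | h <;> omega
    have hiff2 : hi.toNat + 1 < j + 1 ↔ ¬ ((j : Int) ≤ b) := by
      rcases m3 with h | h <;> omega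
    by_cases h1 : a ≤ (j : Int) <;> by_cases h2 : (j : Int) ≤ b
    · rw [if_pos (hiff1.mpr h1), if_neg (fun hx => (hiff2.mp hx) h2), if_pos ⟨h1, h2⟩]
      ring
    · rw [if_pos (hiff1.mpr h1), if_pos (hiff2.mpr h2),
        if_neg (fun hx => h2 hx.2)]
      ring
    · rw [if_neg (fun hx => h1 (hiff1.mp hx)), if_neg (fun hx => (hiff2.mp hx) h2),
        if_neg (fun hx => h1 hx.1)]
      ring
    · exact absurd hcase (by omega)
  · rw [if_neg hcase]
    have : ¬ (a ≤ (j : Int) ∧ (j : Int) ≤ b) := by omega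
    rw [if_neg this]; ring

lemma len_stepB_fold (n : Nat) : ∀ (qs : List (List Int)) (d : List Int),
    (qs.foldl (fun (d : List Int) (q : List Int) =>
        let lo := max ((PySem.List.pyGet? q 0).getD 0) 0
        let hi := min ((PySem.List.pyGet? q 1).getD 0) ((n : Int) - 1)
        if lo ≤ hi then
          let d1 := d.set lo.toNat (d.getD lo.toNat 0 + 1)
          d1.set (hi.toNat + 1) (d1.getD (hi.toNat + 1) 0 - 1)
        else d) d).length = d.length := by
  intro qs
  induction qs with
  | nil => intro d; rfl
  | cons q qs ih =>
    intro d
    rw [List.foldl_cons, ih]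
    simp only
    split <;> simp [List.length_set]

lemma psum_diff (n : Nat) : ∀ (qs : List (List Int)) (d : List Int), d.length = n + 1 →
    ∀ j, j < n →
    ((qs.foldl (fun (d : List Int) (q : List Int) =>
        let lo := max ((PySem.List.pyGet? q 0).getD 0) 0
        let hi := min ((PySem.List.pyGet? q 1).getD 0) ((n : Int) - 1)
        if lo ≤ hi then
          let d1 := d.set lo.toNat (d.getD lo.toNat 0 + 1)
          d1.set (hi.toNat + 1) (d1.getD (hi.toNat + 1) 0 - 1)
        else d) d).take (j + 1)).sum
      = (d.take (j + 1)).sum + countQ qs j := by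
  intro qs
  induction qs with
  | nil => intro d _ j _; simp [countQ]
  | cons q qs ih =>
    intro d hd j hj
    rw [List.foldl_cons]
    have hlen : ((fun (d : List Int) (q : List Int) =>
        let lo := max ((PySem.List.pyGet? q 0).getD 0) 0
        let hi := min ((PySem.List.pyGet? q 1).getD 0) ((n : Int) - 1)
        if lo ≤ hi then
          let d1 := d.set lo.toNat (d.getD lo.toNat 0 + 1)
          d1.set (hi.toNat + 1) (d1.getD (hi.toNat + 1) 0 - 1)
        else d) d q).length = n + 1 := by
      simp only
      split <;> simp [List.length_set, hd]
    rw [ih _ hlen j hj, psum_stepB n d q j hd hj, countQ_cons]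
    ring

-- the prefix-sum output loop of B
lemma loopB (arr diff : List Int) (hdiff : arr.length < diff.length) : ∀ (m : Nat), m ≤ arr.length →
    ((List.range m).foldl (fun (st : List Int × Int) i =>
        let run := st.2 + diff.getD i 0
        (st.1 ++ [arr.getD i 0 + run], run)) ([], 0))
      = ((List.range m).map (fun j => arr.getD j 0 + (diff.take (j + 1)).sum), (diff.take m).sum) := by
  intro m
  induction m with
  | zero => intro _; simp
  | succ m ih =>
    intro hm
    rw [List.range_succ, List.foldl_append, List.foldl_cons, List.foldl_nil, ih (by omega)]
    simp only
    rw [List.map_append]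
    have h2 : (diff.take m).sum + diff[m]?.getD 0 = (diff.take (m + 1)).sum := by
      rw [← List.getD_eq_getElem?_getD]
      exact (sum_take_succ diff m (by omega)).symm
    simp [h2]

lemma getD_solution_alt (qs : List (List Int)) (arr : List Int) (j : Nat) (hj : j < arr.length) :
    (solution_alt arr qs).getD j 0 = arr.getD j 0 + countQ qs j := by
  unfold solution_alt
  simp only
  set n := arr.length with hn
  set diff := qs.foldl (fun (d : List Int) (q : List Int) =>
        let lo := max ((PySem.List.pyGet? q 0).getD 0) 0
        let hi := min ((PySem.List.pyGet? q 1).getD 0) ((n : Int) - 1)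
        if lo ≤ hi then
          let d1 := d.set lo.toNat (d.getD lo.toNat 0 + 1)
          d1.set (hi.toNat + 1) (d1.getD (hi.toNat + 1) 0 - 1)
        else d) (List.replicate (n + 1) 0) with hdiff
  have hdl : diff.length = n + 1 := by
    rw [hdiff, len_stepB_fold n, List.length_replicate]
  rw [loopB arr diff (by omega) n le_rfl]
  simp only
  rw [List.getD_eq_getElem?_getD, List.getElem?_map]
  rw [List.getElem?_range (show j < n by omega)]
  simp only [Option.map_some, Option.getD_some]
  rw [hdiff, psum_diff n qs (List.replicate (n + 1) 0) (by simp) j hj]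
  simp [List.take_replicate]

lemma len_solution_alt (qs : List (List Int)) (arr : List Int) :
    (solution_alt arr qs).length = arr.length := by
  unfold solution_alt
  simp only
  set n := arr.length with hn
  set diff := qs.foldl (fun (d : List Int) (q : List Int) =>
        let lo := max ((PySem.List.pyGet? q 0).getD 0) 0
        let hi := min ((PySem.List.pyGet? q 1).getD 0) ((n : Int) - 1)
        if lo ≤ hi then
          let d1 := d.set lo.toNat (d.getD lo.toNat 0 + 1)
          d1.set (hi.toNat + 1) (d1.getD (hi.toNat + 1) 0 - 1)
        else d) (List.replicate (n + 1) 0) with hdiff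
  have hdl : diff.length = n + 1 := by
    rw [hdiff, len_stepB_fold n, List.length_replicate]
  rw [loopB arr diff (by omega) n le_rfl]
  simp

-- ===== VERDICT (by name: the statement is the Claim_ definition above) =====
theorem solution_spec : Claim_equal_solution := by
  intro arr qs _ _
  unfold Spec_solution
  apply List.ext_getElem
  · rw [len_solution, len_solution_alt]
  · intro j h1 h2
    have hj : j < arr.length := by rw [len_solution] at h1; exact h1
    have e1 : (solution arr qs)[j] = (solution arr qs).getD j 0 :=
      (List.getD_eq_getElem _ 0 h1).symm
    have e2 : (solution_alt arr qs)[j] = (solution_alt arr qs).getD j 0 :=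
      (List.getD_eq_getElem _ 0 h2).symm
    rw [e1, e2, getD_solution qs arr j hj, getD_solution_alt qs arr j hj]
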